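-- pv_equiv track=rewrite | github.com/HannSoo/algoPrac | 서울에서경산까지.py | solution
-- ===== SOURCE A (Python) =====
-- def solution(K, travel):
--
--     '''
--     i번째 도시에서 limit_time 내로 가장 많이 모은 모금액을 fund(i,limit_time)라하자.
--     fund(i,limit_time) =
--     max(fund(i-1,limit_time - Tb[i])
--     + Mb[i],fund(i-1,limit_time - Tw[i]) + Mw[i])
--     '''
--     Tb, Mb, Tw, Mw = [], [], [], []
--     numTowns = len(travel)
--     for t_w, m_w, t_b, m_b in travel:
--         Tw.append(t_w)
--         Mb.append(m_b)
--         Mw.append(m_w)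
--         Tb.append(t_b)
--
--     NEVER = -2
--     NOWAY = -1
--     from collections import defaultdict as dd
--     funds = [dd(lambda : NEVER) for i in range(0,numTowns)] # save as fund[town_index][time_limit] = money
--     def fund(i, limit_time):
--
--         """
--             fund(i-1,limit_time - Tb[i-1]) 이 값이 저장되어있으면 바로 불러오도록 해야한다.
--             그리고 항상 저장되어있어야한다.
--             fund i를 limit_time 별로 구분해놔야함.
--             limit_times = [lt1, lt2, lt3... lti, lt(i+1)]이 있다.
--             현재 limit_time이 lti~lt(i+1)의 구간에 속하면,
--             funds = [0,fd1,... fdi,fdi(i+1)]에 넣어야함.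
--
--             또한 해당 fund(i-1,limit_time - Tb[i-1]) 값이 -1이면
--             역시 timelist 에 append하면 안 된다.
--             """
--         if(limit_time <0):
--
--             return NOWAY
--
--         if(i == 0):
--             return 0
--
--         timelist = []
--
--         if(funds[i-1][limit_time - Tb[i-1]] == NEVER):#fund(i-1,limit_time - Tb[i-1])이 값이 있었는지 판별
--             funds[i-1][limit_time - Tb[i-1]] = fund(i-1,limit_time - Tb[i-1])
--         wayBike = funds[i-1][limit_time - Tb[i-1]]
--         if(wayBike != NOWAY):
--             timelist.append(wayBike + Mb[i-1])
--
--         if(funds[i-1][limit_time - Tw[i-1]] == NEVER):#fund(i-1,limit_time - Tw[i-1])이 값이 있었는지 판별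
--             funds[i-1][limit_time - Tw[i-1]] = fund(i-1,limit_time - Tw[i-1])
--         wayWalk = funds[i-1][limit_time - Tw[i-1]]
--         if(wayWalk != NOWAY):
--             timelist.append(wayWalk + Mw[i-1])
--
--         if(timelist):
--             answer= max(timelist)
--             return answer
--         else:
--             return -1
--
--
--     answer = fund(numTowns,K)
--
--
--     return answer
-- ===== SOURCE B (Python) =====
-- def solution(K, travel):
--     # Bottom-up tabulation: a downward pass collects, per level, the set of time
--     # budgets the recurrence can ask about; an upward pass fills one value table
--     # per level from the one below.  (Same fund(i, t) recurrence as the spec,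
--     # fund value -1 meaning "no way".)
--     needed = [{K}]                      # needed[j] = budgets queried at level n - j
--     for t_w, m_w, t_b, m_b in reversed(travel):
--         cur = needed[-1]
--         nxt = set()
--         for t in cur:
--             if t >= 0:
--                 nxt.add(t - t_b)
--                 nxt.add(t - t_w)
--         needed.append(nxt)
--     key_levels = list(reversed(needed)) # key_levels[i] = budgets queried at level i
--     vals = {}
--     for t in key_levels[0]:             # level 0: fund(0, t) = 0 for t >= 0, else no way
--         vals[t] = -1 if t < 0 else 0
--     for (t_w, m_w, t_b, m_b), keys in zip(travel, key_levels[1:]):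
--         nv = {}
--         for t in keys:
--             if t < 0:
--                 nv[t] = -1
--             else:
--                 best = None
--                 wb = vals[t - t_b]
--                 if wb != -1:
--                     best = wb + m_b
--                 ww = vals[t - t_w]
--                 if ww != -1 and (best is None or ww + m_w > best):
--                     best = ww + m_w
--                 nv[t] = -1 if best is None else best
--         vals = nv
--     return vals[K]
-- ===== Notes on version B (the rewrite author's own statement) =====
-- stated objective: alternative
-- what changed: Replaces A's top-down recursion memoized in per-level defaultdicts (with a -2 'not yet computed' sentinel) by an iterative two-phase tabulation: a downward pass collects, per level, the set of time budgets the recurrence can query, and an upward pass fills one plain value table per level from the table below; no recursion and no sentinel bookkeeping.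
import Mathlib
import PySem

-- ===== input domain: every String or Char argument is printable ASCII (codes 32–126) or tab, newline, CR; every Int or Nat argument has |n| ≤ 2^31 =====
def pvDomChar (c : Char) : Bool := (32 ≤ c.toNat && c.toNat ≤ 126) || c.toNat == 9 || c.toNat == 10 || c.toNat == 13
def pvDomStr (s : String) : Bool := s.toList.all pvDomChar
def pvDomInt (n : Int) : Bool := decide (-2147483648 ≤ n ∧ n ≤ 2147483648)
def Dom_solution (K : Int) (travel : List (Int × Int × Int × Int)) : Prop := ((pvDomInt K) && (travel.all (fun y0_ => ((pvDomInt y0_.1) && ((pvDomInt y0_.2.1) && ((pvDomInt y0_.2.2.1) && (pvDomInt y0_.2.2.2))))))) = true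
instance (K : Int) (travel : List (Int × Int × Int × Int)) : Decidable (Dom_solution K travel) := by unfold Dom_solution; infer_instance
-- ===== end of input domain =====

-- B replaces A's memoized top-down recursion by an iterative two-phase tabulation
-- (collect the queried budget sets per level going down, then fill one value table
-- per level going up); same results by a different decomposition.

-- ===== PORT A =====

-- defaultdict(lambda: NEVER) __getitem__: returns the stored value, inserting the
-- default -2 on a miss (exactly CPython's defaultdict behaviour).
def ddGet (d : PySem.Dict Int Int) (k : Int) : Int × PySem.Dict Int Int :=
  match d.get? k with
  | some v => (v, d)
  | none => (-2, d.insert k (-2))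

-- the inner recursive 'fund(i, limit_time)' of A; the mutable list 'funds' of
-- per-level memo dicts is threaded as explicit state.  List reads 'funds[i-1]',
-- 'Tb[i-1]', … are ported with getD: in every call A makes the index is in range
-- (i ≤ len(funds) = numTowns), so the defaults are never consulted.
def fundA (Tb Mb Tw Mw : List Int) (i : Nat) (t : Int)
    (funds : List (PySem.Dict Int Int)) : Int × List (PySem.Dict Int Int) :=
  if t < 0 then (-1, funds)
  else
    match i with
    | 0 => (0, funds)
    | i' + 1 =>
      let key1 := t - Tb.getD i' 0
      let p1 := ddGet (funds.getD i' PySem.Dict.empty) key1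
      let funds1 := funds.set i' p1.2
      let funds2 :=
        if p1.1 = -2 then
          let r := fundA Tb Mb Tw Mw i' key1 funds1
          r.2.set i' ((r.2.getD i' PySem.Dict.empty).insert key1 r.1)
        else funds1
      let p2 := ddGet (funds2.getD i' PySem.Dict.empty) key1
      let funds3 := funds2.set i' p2.2
      let timelist1 : List Int :=
        if p2.1 ≠ -1 then ([] : List Int) ++ [p2.1 + Mb.getD i' 0] else []
      let key2 := t - Tw.getD i' 0
      let q1 := ddGet (funds3.getD i' PySem.Dict.empty) key2
      let funds4 := funds3.set i' q1.2
      let funds5 :=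
        if q1.1 = -2 then
          let r := fundA Tb Mb Tw Mw i' key2 funds4
          r.2.set i' ((r.2.getD i' PySem.Dict.empty).insert key2 r.1)
        else funds4
      let q2 := ddGet (funds5.getD i' PySem.Dict.empty) key2
      let funds6 := funds5.set i' q2.2
      let timelist2 : List Int :=
        if q2.1 ≠ -1 then timelist1 ++ [q2.1 + Mw.getD i' 0] else timelist1
      if timelist2 ≠ [] then ((PySem.List.max? timelist2 (fun x => x)).getD 0, funds6)
      else (-1, funds6)

def solution (K : Int) (travel : List (Int × Int × Int × Int)) : Int :=
  -- Tb, Mb, Tw, Mw = [], [], [], []; for t_w, m_w, t_b, m_b in travel: append …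
  let arrs := travel.foldl
    (fun (acc : List Int × List Int × List Int × List Int) town =>
      (acc.1 ++ [town.2.2.1], acc.2.1 ++ [town.2.2.2],
       acc.2.2.1 ++ [town.1], acc.2.2.2 ++ [town.2.1]))
    ([], [], [], [])
  let numTowns := travel.length
  -- funds = [defaultdict(lambda: NEVER) for i in range(0, numTowns)]
  let funds0 := (PySem.List.pyRange 0 (numTowns : Int) 1).map
      (fun _ => (PySem.Dict.empty : PySem.Dict Int Int))
  (fundA arrs.1 arrs.2.1 arrs.2.2.1 arrs.2.2.2 numTowns K funds0).1

-- ===== PORT B =====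

def solution_alt (K : Int) (travel : List (Int × Int × Int × Int)) : Int :=
  -- downward pass: needed[j] = set of budgets queried at level n - j
  let needed := travel.reverse.foldl
    (fun acc town =>
      let cur := (PySem.List.pyGet? acc (-1)).getD PySem.Set.empty
      let nxt := cur.foldl
        (fun nxt t =>
          if t ≥ 0 then (nxt.add (t - town.2.2.1)).add (t - town.1) else nxt)
        PySem.Set.empty
      acc ++ [nxt])
    [PySem.Set.ofList [K]]
  let key_levels := needed.reverse
  -- level 0 table: fund(0, t) = 0 for t ≥ 0, else no way (-1)
  let vals0 := ((PySem.List.pyGet? key_levels 0).getD PySem.Set.empty).foldl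
    (fun vals t => vals.insert t (if t < 0 then (-1 : Int) else 0)) PySem.Dict.empty
  -- upward pass: one fresh table per level, filled from the table below.
  -- Python's 'vals[...]' lookups are ported with get?/getD: the downward pass
  -- collected exactly these keys, so they are always present (proved below).
  let vals := (travel.zip (PySem.List.slice key_levels (some 1))).foldl
    (fun vals pr =>
      pr.2.foldl
        (fun nv t =>
          if t < 0 then nv.insert t (-1)
          else
            let wb := (vals.get? (t - pr.1.2.2.1)).getD 0
            let best : Option Int := if wb ≠ -1 then some (wb + pr.1.2.2.2) else none
            let ww := (vals.get? (t - pr.1.1)).getD 0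
            let best2 : Option Int :=
              if ww ≠ -1 then
                match best with
                | none => some (ww + pr.1.2.1)
                | some b => if ww + pr.1.2.1 > b then some (ww + pr.1.2.1) else some b
              else best
            nv.insert t (match best2 with | none => -1 | some b => b))
        PySem.Dict.empty)
    vals0
  -- return vals[K]  (K is always a key of the top-level table)
  match vals.get? K with
  | some v => v
  | none => -1

-- ===== PRECONDITION & SPEC =====
def Spec_solution (K : Int) (travel : List (Int × Int × Int × Int)) (out : Int) : Prop := out = solution_alt K travel
instance (K : Int) (travel : List (Int × Int × Int × Int)) (out : Int) : Decidable (Spec_solution K travel out) := by unfold Spec_solution; infer_instance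

-- ===== CLAIM (what is proved, stated in full; the proofs are below) =====
def Claim_equal_solution : Prop := ∀ (K : Int) (travel : List (Int × Int × Int × Int)), Dom_solution K travel → Spec_solution K travel (solution K travel)

-- ===== LEMMAS AND PROOFS =====

-- the common functional specification: the recurrence fund(i, t) of A's docstring,
-- written over the reversed town list (head = last town).
def combineTL (wb ww mb mw : Int) : Int :=
  let tl : List Int :=
    (if wb ≠ -1 then [wb + mb] else []) ++ (if ww ≠ -1 then [ww + mw] else [])
  if tl ≠ [] then (PySem.List.max? tl (fun x => x)).getD 0 else -1

def pureR (r : List (Int × Int × Int × Int)) (t : Int) : Int :=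
  if t < 0 then -1
  else
    match r with
    | [] => 0
    | town :: r' =>
      combineTL (pureR r' (t - town.2.2.1)) (pureR r' (t - town.1))
        town.2.2.2 town.2.1

-- A-side intermediate spec: the same recurrence over the four index arrays.
def pureF (Tb Mb Tw Mw : List Int) (i : Nat) (t : Int) : Int :=
  if t < 0 then -1
  else
    match i with
    | 0 => 0
    | i' + 1 =>
      combineTL (pureF Tb Mb Tw Mw i' (t - Tb.getD i' 0))
        (pureF Tb Mb Tw Mw i' (t - Tw.getD i' 0)) (Mb.getD i' 0) (Mw.getD i' 0)

-- memo invariant: every value stored in a level-j dict is the default -2 or fund(j, k)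
def InvA (Tb Mb Tw Mw : List Int) (funds : List (PySem.Dict Int Int)) : Prop :=
  ∀ (j : Nat) (k v : Int), (funds.getD j PySem.Dict.empty).get? k = some v →
    v = -2 ∨ v = pureF Tb Mb Tw Mw j k

lemma getD_set_self {α : Type} (l : List α) (i : Nat) (d x : α) (h : i < l.length) :
    (l.set i x).getD i d = x := by
  simp [List.getD_eq_getElem?_getD, h]

lemma get?_empty (k : Int) : (PySem.Dict.empty : PySem.Dict Int Int).get? k = none := by
  simp [PySem.Dict.get?, PySem.Dict.empty]

lemma InvA_set (Tb Mb Tw Mw : List Int) (funds : List (PySem.Dict Int Int))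
    (j : Nat) (d : PySem.Dict Int Int)
    (h : InvA Tb Mb Tw Mw funds)
    (hd : ∀ k v, d.get? k = some v → v = -2 ∨ v = pureF Tb Mb Tw Mw j k) :
    InvA Tb Mb Tw Mw (funds.set j d) := by
  intro j' k v hv
  rw [List.getD_eq_getElem?_getD, List.getElem?_set] at hv
  by_cases hjj : j = j'
  · subst hjj
    by_cases hj : j < funds.length
    · simp [hj] at hv; exact hd k v hv
    · simp [hj] at hv
  · simp [hjj] at hv
    exact h j' k v (by rw [List.getD_eq_getElem?_getD]; exact hv)

-- one memo-lookup block of fundA (proof-side name for the repeated inline block)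
def blockF (Tb Mb Tw Mw : List Int) (i' : Nat) (key : Int)
    (fs : List (PySem.Dict Int Int)) : Int × List (PySem.Dict Int Int) :=
  let p := ddGet (fs.getD i' PySem.Dict.empty) key
  let fs1 := fs.set i' p.2
  let fs2 :=
    if p.1 = -2 then
      let r := fundA Tb Mb Tw Mw i' key fs1
      r.2.set i' ((r.2.getD i' PySem.Dict.empty).insert key r.1)
    else fs1
  let q := ddGet (fs2.getD i' PySem.Dict.empty) key
  (q.1, fs2.set i' q.2)

lemma fundA_succ (Tb Mb Tw Mw : List Int) (i' : Nat) (t : Int)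
    (funds : List (PySem.Dict Int Int)) (ht : ¬ t < 0) :
    fundA Tb Mb Tw Mw (i' + 1) t funds =
      (let b1 := blockF Tb Mb Tw Mw i' (t - Tb.getD i' 0) funds
       let b2 := blockF Tb Mb Tw Mw i' (t - Tw.getD i' 0) b1.2
       let tl1 : List Int :=
         if b1.1 ≠ -1 then ([] : List Int) ++ [b1.1 + Mb.getD i' 0] else []
       let tl2 : List Int :=
         if b2.1 ≠ -1 then tl1 ++ [b2.1 + Mw.getD i' 0] else tl1
       if tl2 ≠ [] then ((PySem.List.max? tl2 (fun x => x)).getD 0, b2.2)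
       else (-1, b2.2)) := by
  conv_lhs => rw [fundA]
  simp only [blockF, if_neg ht]

lemma blockF_spec (Tb Mb Tw Mw : List Int) (i' : Nat)
    (ih : ∀ (t : Int) (fs : List (PySem.Dict Int Int)),
      i' ≤ fs.length → InvA Tb Mb Tw Mw fs →
      (fundA Tb Mb Tw Mw i' t fs).1 = pureF Tb Mb Tw Mw i' t ∧
      InvA Tb Mb Tw Mw (fundA Tb Mb Tw Mw i' t fs).2 ∧
      (fundA Tb Mb Tw Mw i' t fs).2.length = fs.length)
    (key : Int) (fs : List (PySem.Dict Int Int))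
    (hlen : i' < fs.length) (hInv : InvA Tb Mb Tw Mw fs) :
    (blockF Tb Mb Tw Mw i' key fs).1 = pureF Tb Mb Tw Mw i' key ∧
    InvA Tb Mb Tw Mw (blockF Tb Mb Tw Mw i' key fs).2 ∧
    (blockF Tb Mb Tw Mw i' key fs).2.length = fs.length := by
  unfold blockF
  rcases hg : (fs.getD i' PySem.Dict.empty).get? key with _ | v
  case none =>
    -- miss: defaultdict stores the default -2, the check fires, the value is recomputed
    simp only [ddGet, hg, if_true]
    have hInv1 : InvA Tb Mb Tw Mw (fs.set i' ((fs.getD i' PySem.Dict.empty).insert key (-2))) := by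
      refine InvA_set _ _ _ _ _ _ _ hInv ?_
      intro k v hv
      by_cases hk : k = key
      · subst hk; rw [PySem.Dict.get?_insert_self] at hv
        injection hv with h; exact Or.inl h.symm
      · rw [PySem.Dict.get?_insert_of_ne _ _ hk] at hv; exact hInv i' k v hv
    obtain ⟨hr1, hr2, hr3⟩ := ih key _ (by simp; omega) hInv1
    set r := fundA Tb Mb Tw Mw i' key
      (fs.set i' ((fs.getD i' PySem.Dict.empty).insert key (-2))) with hr
    have hr3' : r.2.length = fs.length := by rw [hr3]; simp
    have hmemo : ∀ k v, ((r.2.getD i' PySem.Dict.empty).insert key r.1).get? k = some v →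
        v = -2 ∨ v = pureF Tb Mb Tw Mw i' k := by
      intro k v hv
      by_cases hk : k = key
      · subst hk; rw [PySem.Dict.get?_insert_self] at hv
        injection hv with h; right; rw [← h]; exact hr1
      · rw [PySem.Dict.get?_insert_of_ne _ _ hk] at hv; exact hr2 i' k v hv
    have hInv2 : InvA Tb Mb Tw Mw (r.2.set i' ((r.2.getD i' PySem.Dict.empty).insert key r.1)) :=
      InvA_set _ _ _ _ _ _ _ hr2 hmemo
    have hget2 : (r.2.set i' ((r.2.getD i' PySem.Dict.empty).insert key r.1)).getD i' PySem.Dict.empty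
        = (r.2.getD i' PySem.Dict.empty).insert key r.1 :=
      getD_set_self _ _ _ _ (by omega)
    rw [hget2]
    simp only [PySem.Dict.get?_insert_self]
    exact ⟨hr1, InvA_set _ _ _ _ _ _ _ hInv2 hmemo, by simp [hr3']⟩
  case some =>
    simp only [ddGet, hg]
    have hInv1 : InvA Tb Mb Tw Mw (fs.set i' (fs.getD i' PySem.Dict.empty)) :=
      InvA_set _ _ _ _ _ _ _ hInv (fun k v hv => hInv i' k v hv)
    by_cases hv2 : v = -2
    · -- stored default: the check fires, recompute
      subst hv2
      rw [if_pos rfl]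
      obtain ⟨hr1, hr2, hr3⟩ := ih key _ (by simp; omega) hInv1
      set r := fundA Tb Mb Tw Mw i' key (fs.set i' (fs.getD i' PySem.Dict.empty)) with hr
      have hr3' : r.2.length = fs.length := by rw [hr3]; simp
      have hmemo : ∀ k v, ((r.2.getD i' PySem.Dict.empty).insert key r.1).get? k = some v →
          v = -2 ∨ v = pureF Tb Mb Tw Mw i' k := by
        intro k v hv
        by_cases hk : k = key
        · subst hk; rw [PySem.Dict.get?_insert_self] at hv
          injection hv with h; right; rw [← h]; exact hr1
        · rw [PySem.Dict.get?_insert_of_ne _ _ hk] at hv; exact hr2 i' k v hv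
      have hInv2 : InvA Tb Mb Tw Mw (r.2.set i' ((r.2.getD i' PySem.Dict.empty).insert key r.1)) :=
        InvA_set _ _ _ _ _ _ _ hr2 hmemo
      have hget2 : (r.2.set i' ((r.2.getD i' PySem.Dict.empty).insert key r.1)).getD i' PySem.Dict.empty
          = (r.2.getD i' PySem.Dict.empty).insert key r.1 :=
        getD_set_self _ _ _ _ (by omega)
      rw [hget2]
      simp only [PySem.Dict.get?_insert_self]
      exact ⟨hr1, InvA_set _ _ _ _ _ _ _ hInv2 hmemo, by simp [hr3']⟩
    · -- hit with a real value: it is fund(i', key) by the invariant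
      rw [if_neg hv2]
      have hget1 : (fs.set i' (fs.getD i' PySem.Dict.empty)).getD i' PySem.Dict.empty
          = fs.getD i' PySem.Dict.empty := getD_set_self _ _ _ _ (by omega)
      rw [hget1]
      simp only [hg]
      refine ⟨?_, InvA_set _ _ _ _ _ _ _ hInv1 (fun k v hv => hInv i' k v hv), by simp⟩
      rcases hInv i' key v hg with h | h
      · exact absurd h hv2
      · exact h

lemma tl_eq (wb ww mb mw : Int) :
    (if ww ≠ -1 then
        (if wb ≠ -1 then ([] : List Int) ++ [wb + mb] else []) ++ [ww + mw]
      else (if wb ≠ -1 then ([] : List Int) ++ [wb + mb] else [])) =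
      (if wb ≠ -1 then [wb + mb] else []) ++ (if ww ≠ -1 then [ww + mw] else []) := by
  by_cases hb : wb = -1 <;> by_cases hw : ww = -1 <;> simp [hb, hw]

lemma fundA_eq (Tb Mb Tw Mw : List Int) (i : Nat) :
    ∀ (t : Int) (funds : List (PySem.Dict Int Int)),
      i ≤ funds.length → InvA Tb Mb Tw Mw funds →
      (fundA Tb Mb Tw Mw i t funds).1 = pureF Tb Mb Tw Mw i t ∧
      InvA Tb Mb Tw Mw (fundA Tb Mb Tw Mw i t funds).2 ∧
      (fundA Tb Mb Tw Mw i t funds).2.length = funds.length := by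
  induction i with
  | zero =>
    intro t funds _ hInv
    by_cases ht : t < 0 <;> simp [fundA, pureF, ht] <;> exact hInv
  | succ i' ih =>
    intro t funds hlen hInv
    by_cases ht : t < 0
    · rw [pureF.eq_def, if_pos ht]
      unfold fundA
      rw [if_pos ht]
      exact ⟨rfl, hInv, rfl⟩
    · rw [fundA_succ Tb Mb Tw Mw i' t funds ht]
      simp only []
      obtain ⟨hb1v, hb1I, hb1L⟩ :=
        blockF_spec Tb Mb Tw Mw i' ih (t - Tb.getD i' 0) funds (by omega) hInv
      obtain ⟨hb2v, hb2I, hb2L⟩ :=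
        blockF_spec Tb Mb Tw Mw i' ih (t - Tw.getD i' 0)
          (blockF Tb Mb Tw Mw i' (t - Tb.getD i' 0) funds).2 (by omega) hb1I
      rw [pureF.eq_def, if_neg ht]
      rw [hb1v, hb2v, tl_eq]
      simp only [apply_ite (Prod.fst (α := Int) (β := List (PySem.Dict Int Int))),
        apply_ite (Prod.snd (α := Int) (β := List (PySem.Dict Int Int))), ite_self]
      refine ⟨?_, hb2I, by rw [hb2L, hb1L]⟩
      rw [combineTL]

lemma buildArrs (travel : List (Int × Int × Int × Int)) :
    ∀ (a b c d : List Int),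
      travel.foldl
        (fun (acc : List Int × List Int × List Int × List Int) town =>
          (acc.1 ++ [town.2.2.1], acc.2.1 ++ [town.2.2.2],
           acc.2.2.1 ++ [town.1], acc.2.2.2 ++ [town.2.1])) (a, b, c, d) =
      (a ++ travel.map (fun x => x.2.2.1), b ++ travel.map (fun x => x.2.2.2),
       c ++ travel.map (fun x => x.1), d ++ travel.map (fun x => x.2.1)) := by
  induction travel with
  | nil => simp
  | cons x xs ih => intro a b c d; simp [List.foldl_cons, ih]

lemma getD_map_lt {α : Type} (l : List α) (f : α → Int) (i : Nat) (h : i < l.length) :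
    (l.map f).getD i 0 = f l[i] := by
  simp [List.getD_eq_getElem?_getD, h]

lemma pureF_eq (travel : List (Int × Int × Int × Int)) (i : Nat) (hi : i ≤ travel.length) :
    ∀ t, pureF (travel.map (fun x => x.2.2.1)) (travel.map (fun x => x.2.2.2))
        (travel.map (fun x => x.1)) (travel.map (fun x => x.2.1)) i t =
      pureR (travel.take i).reverse t := by
  induction i with
  | zero => intro t; rw [pureF.eq_def, pureR.eq_def]; simp
  | succ i' ih =>
    intro t
    have hi' : i' < travel.length := by omega
    rw [pureF.eq_def, pureR.eq_def]
    have htake : (travel.take (i' + 1)).reverse = travel[i'] :: (travel.take i').reverse := by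
      rw [List.take_add_one, List.getElem?_eq_getElem hi']
      simp
    rw [htake]
    by_cases ht : t < 0
    · rw [if_pos ht, if_pos ht]
    · rw [if_neg ht, if_neg ht]
      have ih' := ih (by omega)
      simp only [getD_map_lt _ _ _ hi', ih']

lemma solution_eq_pureR (K : Int) (travel : List (Int × Int × Int × Int)) :
    solution K travel = pureR travel.reverse K := by
  unfold solution
  simp only []
  rw [buildArrs travel [] [] [] []]
  simp only [List.nil_append]
  have hlen0 : ((PySem.List.pyRange 0 (travel.length : Int) 1).map
      (fun _ => (PySem.Dict.empty : PySem.Dict Int Int))).length = travel.length := by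
    simp [PySem.List.pyRange_zero_natCast]
  have hInv0 : InvA (travel.map (fun x => x.2.2.1)) (travel.map (fun x => x.2.2.2))
      (travel.map (fun x => x.1)) (travel.map (fun x => x.2.1))
      ((PySem.List.pyRange 0 (travel.length : Int) 1).map
        (fun _ => (PySem.Dict.empty : PySem.Dict Int Int))) := by
    intro j k v hv
    exfalso
    have hd : (((PySem.List.pyRange 0 (travel.length : Int) 1).map
        (fun _ => (PySem.Dict.empty : PySem.Dict Int Int))).getD j PySem.Dict.empty)
        = PySem.Dict.empty := by
      rw [List.getD_eq_getElem?_getD, List.getElem?_map]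
      rcases (PySem.List.pyRange 0 (travel.length : Int) 1)[j]? with _ | x <;> simp
    rw [hd, get?_empty] at hv
    simp at hv
  obtain ⟨h1, _, _⟩ := fundA_eq _ _ _ _ travel.length K _ (by omega) hInv0
  rw [h1, pureF_eq travel travel.length (le_refl _) K, List.take_length]

-- ===== B-side lemmas =====

def expandB (town : Int × Int × Int × Int) (cur : PySem.Set Int) : PySem.Set Int :=
  cur.foldl
    (fun nxt t => if t ≥ 0 then (nxt.add (t - town.2.2.1)).add (t - town.1) else nxt)
    PySem.Set.empty

def scanE : List (Int × Int × Int × Int) → PySem.Set Int → List (PySem.Set Int)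
  | [], s => [s]
  | town :: l, s => s :: scanE l (expandB town s)

def baseB (keys : PySem.Set Int) : PySem.Dict Int Int :=
  keys.foldl (fun vals t => vals.insert t (if t < 0 then (-1 : Int) else 0))
    PySem.Dict.empty

def bigVal (vals : PySem.Dict Int Int) (town : Int × Int × Int × Int) (t : Int) : Int :=
  let wb := (vals.get? (t - town.2.2.1)).getD 0
  let best : Option Int := if wb ≠ -1 then some (wb + town.2.2.2) else none
  let ww := (vals.get? (t - town.1)).getD 0
  let best2 : Option Int :=
    if ww ≠ -1 then
      match best with
      | none => some (ww + town.2.1)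
      | some b => if ww + town.2.1 > b then some (ww + town.2.1) else some b
    else best
  match best2 with | none => -1 | some b => b

def fillB (vals : PySem.Dict Int Int) (town : Int × Int × Int × Int)
    (keys : PySem.Set Int) : PySem.Dict Int Int :=
  keys.foldl
    (fun nv t => nv.insert t (if t < 0 then -1 else bigVal vals town t))
    PySem.Dict.empty

def bspec : List (Int × Int × Int × Int) → PySem.Set Int → PySem.Dict Int Int
  | [], s => baseB s
  | town :: r, s => fillB (bspec r (expandB town s)) town s

lemma scanE_length (r : List (Int × Int × Int × Int)) :
    ∀ s, (scanE r s).length = r.length + 1 := by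
  induction r with
  | nil => intro s; simp [scanE]
  | cons x xs ih => intro s; simp [scanE, ih]

lemma pyGet_last {α : Type} (acc : List α) (s : α) :
    PySem.List.pyGet? (acc ++ [s]) (-1) = some s := by
  simp [PySem.List.pyGet?, PySem.List.pyIdx?]

lemma fold_needed (l : List (Int × Int × Int × Int)) :
    ∀ (acc : List (PySem.Set Int)) (s : PySem.Set Int),
      l.foldl
        (fun acc town =>
          acc ++ [expandB town ((PySem.List.pyGet? acc (-1)).getD PySem.Set.empty)])
        (acc ++ [s]) = acc ++ scanE l s := by
  induction l with
  | nil => intro acc s; simp [scanE]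
  | cons x xs ih =>
    intro acc s
    rw [List.foldl_cons]
    have h1 : (acc ++ [s]) ++ [expandB x ((PySem.List.pyGet? (acc ++ [s]) (-1)).getD PySem.Set.empty)]
        = (acc ++ [s]) ++ [expandB x s] := by rw [pyGet_last]; rfl
    simp only [h1]
    rw [ih (acc ++ [s]) (expandB x s)]
    simp [scanE]

lemma get?_foldl_insert (l : List Int) (f : Int → Int) :
    ∀ (d0 : PySem.Dict Int Int) (x : Int),
      (l.foldl (fun d t => d.insert t (f t)) d0).get? x =
        if x ∈ l then some (f x) else d0.get? x := by
  induction l with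
  | nil => intro d0 x; simp
  | cons y ys ih =>
    intro d0 x
    rw [List.foldl_cons, ih]
    by_cases hmem : x ∈ ys
    · simp [hmem]
    · by_cases hxy : x = y
      · subst hxy; simp [hmem, PySem.Dict.get?_insert_self]
      · simp [hmem, hxy, PySem.Dict.get?_insert_of_ne _ _ hxy]

lemma mem_foldl_expand (town : Int × Int × Int × Int) (l : List Int) :
    ∀ (acc : PySem.Set Int) (x : Int), x ∈ acc →
      x ∈ l.foldl
        (fun nxt t => if t ≥ 0 then (nxt.add (t - town.2.2.1)).add (t - town.1) else nxt)
        acc := by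
  induction l with
  | nil => intro acc x h; simpa using h
  | cons y ys ih =>
    intro acc x h
    rw [List.foldl_cons]
    apply ih
    by_cases hy : y ≥ 0
    · simp [hy, PySem.Set.mem_add]; tauto
    · simpa [hy] using h

lemma mem_foldl_expand_intro (town : Int × Int × Int × Int) (l : List Int) :
    ∀ (acc : PySem.Set Int) (t : Int), t ∈ l → 0 ≤ t →
      (t - town.2.2.1) ∈ l.foldl
          (fun nxt t => if t ≥ 0 then (nxt.add (t - town.2.2.1)).add (t - town.1) else nxt) acc ∧
      (t - town.1) ∈ l.foldl
          (fun nxt t => if t ≥ 0 then (nxt.add (t - town.2.2.1)).add (t - town.1) else nxt) acc := by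
  induction l with
  | nil => intro acc t h; simp at h
  | cons y ys ih =>
    intro acc t h ht
    rcases List.mem_cons.mp h with rfl | hmem
    · rw [List.foldl_cons]
      have hy : t ≥ 0 := ht
      rw [if_pos hy]
      constructor
      · exact mem_foldl_expand town ys _ _ (by simp [PySem.Set.mem_add])
      · exact mem_foldl_expand town ys _ _ (by simp [PySem.Set.mem_add])
    · exact ih _ t hmem ht

lemma mem_expandB (town : Int × Int × Int × Int) (s : PySem.Set Int) (t : Int)
    (hmem : t ∈ s) (ht : 0 ≤ t) :
    (t - town.2.2.1) ∈ expandB town s ∧ (t - town.1) ∈ expandB town s := by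
  unfold expandB
  exact mem_foldl_expand_intro town s PySem.Set.empty t hmem ht

lemma bestChain_eq (wb ww mb mw : Int) :
    (match
        (if ww ≠ -1 then
          match (if wb ≠ -1 then some (wb + mb) else none) with
          | none => some (ww + mw)
          | some b => if ww + mw > b then some (ww + mw) else some b
        else (if wb ≠ -1 then some (wb + mb) else none) : Option Int) with
      | none => -1
      | some b => b) = combineTL wb ww mb mw := by
  by_cases hb : wb = -1 <;> by_cases hw : ww = -1
  · simp [combineTL, hb, hw]
  · simp [combineTL, hb, hw, PySem.List.max?_id_cons]
  · simp [combineTL, hb, hw, PySem.List.max?_id_cons]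
  · simp only [combineTL, hb, hw, ne_eq, not_false_iff, if_pos,
      List.singleton_append, PySem.List.max?_id_cons]
    simp only [List.foldl_cons, List.foldl_nil, Option.getD_some]
    rw [Int.max_def]
    by_cases h : ww + mw > wb + mb
    case neg =>
      rw [if_neg h]
      show wb + mb = _
      rw [if_pos (by simp)]
      by_cases he : wb + mb ≤ ww + mw
      · rw [if_pos he]; omega
      · rw [if_neg he]
    case pos =>
      rw [if_pos h]
      show ww + mw = _
      rw [if_pos (by simp), if_pos (by omega : wb + mb ≤ ww + mw)]

lemma bspec_get? (r : List (Int × Int × Int × Int)) :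
    ∀ (s : PySem.Set Int) (t : Int), t ∈ s →
      (bspec r s).get? t = some (pureR r t) := by
  induction r with
  | nil =>
    intro s t hmem
    show (baseB s).get? t = _
    unfold baseB
    rw [get?_foldl_insert s (fun t => if t < 0 then (-1 : Int) else 0), if_pos hmem]
    rw [pureR.eq_def]
  | cons town r' ih =>
    intro s t hmem
    show (fillB (bspec r' (expandB town s)) town s).get? t = _
    unfold fillB
    rw [get?_foldl_insert s (fun t => if t < 0 then -1 else bigVal (bspec r' (expandB town s)) town t), if_pos hmem]
    by_cases ht : t < 0
    · rw [pureR.eq_def, if_pos ht, if_pos ht]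
    · rw [if_neg ht, pureR.eq_def, if_neg ht]
      have h2 := mem_expandB town s t hmem (by omega)
      have hb := ih (expandB town s) (t - town.2.2.1) h2.1
      have hw := ih (expandB town s) (t - town.1) h2.2
      unfold bigVal
      simp only [hb, hw, Option.getD_some]
      exact congrArg some (bestChain_eq _ _ _ _)

lemma fold_zip (r : List (Int × Int × Int × Int)) :
    ∀ s : PySem.Set Int,
      ((r.reverse).zip ((scanE r s).reverse.drop 1)).foldl
          (fun vals pr => fillB vals pr.1 pr.2)
          (baseB ((scanE r s).reverse.headD PySem.Set.empty)) = bspec r s := by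
  induction r with
  | nil => intro s; simp [scanE, bspec]
  | cons town r' ih =>
    intro s
    have hA : (scanE (town :: r') s).reverse = (scanE r' (expandB town s)).reverse ++ [s] := by
      simp [scanE]
    have hlenA : (scanE r' (expandB town s)).reverse.length = r'.length + 1 := by
      simp [scanE_length]
    have hAne : (scanE r' (expandB town s)).reverse ≠ [] := by
      intro h; rw [h] at hlenA; simp at hlenA
    obtain ⟨a0, A', hA'⟩ : ∃ a0 A', (scanE r' (expandB town s)).reverse = a0 :: A' :=
      List.exists_cons_of_ne_nil hAne
    rw [hA, hA']
    have hdrop : ((a0 :: A') ++ [s]).drop 1 = A' ++ [s] := by simp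
    have hhead : ((a0 :: A') ++ [s]).headD PySem.Set.empty = a0 := by simp
    rw [hdrop, hhead]
    have hrev : (town :: r').reverse = r'.reverse ++ [town] := by simp
    rw [hrev]
    have hlen2 : r'.reverse.length = A'.length := by
      have := hlenA; rw [hA'] at this; simp at this ⊢; omega
    rw [List.zip_append hlen2, List.foldl_append]
    have hIH := ih (expandB town s)
    rw [hA'] at hIH
    simp only [List.headD_cons] at hIH
    simp only [List.drop_one] at hIH ⊢
    rw [show ((a0 :: A').tail : List (PySem.Set Int)) = A' from rfl] at hIH
    rw [hIH]
    simp [bspec]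

lemma pyGet_zero_getD (l : List (PySem.Set Int)) :
    (PySem.List.pyGet? l 0).getD PySem.Set.empty = l.headD PySem.Set.empty := by
  cases l <;> simp [PySem.List.pyGet?, PySem.List.pyIdx?]

lemma solution_alt_eq_pureR (K : Int) (travel : List (Int × Int × Int × Int)) :
    solution_alt K travel = pureR travel.reverse K := by
  unfold solution_alt
  simp only []
  rw [show (fun (acc : List (PySem.Set Int)) (town : Int × Int × Int × Int) =>
        let cur := (PySem.List.pyGet? acc (-1)).getD PySem.Set.empty
        let nxt := cur.foldl
          (fun nxt t =>
            if t ≥ 0 then (nxt.add (t - town.2.2.1)).add (t - town.1) else nxt)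
          PySem.Set.empty
        acc ++ [nxt]) =
      (fun acc town =>
        acc ++ [expandB town ((PySem.List.pyGet? acc (-1)).getD PySem.Set.empty)])
    from rfl]
  rw [show ([PySem.Set.ofList [K]] : List (PySem.Set Int)) = [] ++ [PySem.Set.ofList [K]] from rfl]
  rw [fold_needed travel.reverse [] (PySem.Set.ofList [K])]
  rw [List.nil_append, pyGet_zero_getD]
  rw [PySem.List.slice_from _ (by norm_num : (0:Int) ≤ 1)]
  rw [show ((1:Int).toNat) = 1 from rfl]
  rw [show (fun (vals : PySem.Dict Int Int) (pr : (Int × Int × Int × Int) × PySem.Set Int) =>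
      pr.2.foldl
        (fun nv t =>
          if t < 0 then nv.insert t (-1)
          else
            let wb := (vals.get? (t - pr.1.2.2.1)).getD 0
            let best : Option Int := if wb ≠ -1 then some (wb + pr.1.2.2.2) else none
            let ww := (vals.get? (t - pr.1.1)).getD 0
            let best2 : Option Int :=
              if ww ≠ -1 then
                match best with
                | none => some (ww + pr.1.2.1)
                | some b => if ww + pr.1.2.1 > b then some (ww + pr.1.2.1) else some b
              else best
            nv.insert t (match best2 with | none => -1 | some b => b))
        PySem.Dict.empty) =
      (fun vals pr => fillB vals pr.1 pr.2) from by
    funext vals pr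
    unfold fillB
    congr 1
    funext nv t
    by_cases ht : t < 0
    · rw [if_pos ht, if_pos ht]
    · rw [if_neg ht, if_neg ht]; rfl]
  rw [show (List.foldl (fun (vals : PySem.Dict Int Int) t => vals.insert t (if t < 0 then (-1:Int) else 0)) PySem.Dict.empty
        ((scanE travel.reverse (PySem.Set.ofList [K])).reverse.headD PySem.Set.empty)) =
      baseB ((scanE travel.reverse (PySem.Set.ofList [K])).reverse.headD PySem.Set.empty) from rfl]
  rw [show (travel.zip (List.drop 1 (scanE travel.reverse (PySem.Set.ofList [K])).reverse)) =
      ((travel.reverse).reverse.zip ((scanE travel.reverse (PySem.Set.ofList [K])).reverse.drop 1)) from by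
    rw [List.reverse_reverse]]
  rw [fold_zip travel.reverse (PySem.Set.ofList [K])]
  rw [bspec_get? travel.reverse (PySem.Set.ofList [K]) K (by
    have := PySem.Set.mem_ofList ([K] : List Int) K
    simp at this ⊢
    try exact this
    try simp [PySem.Set.ofList])]

-- ===== VERDICT (by name: the statement is the Claim_ definition above) =====
theorem solution_spec : Claim_equal_solution := by
  intro K travel _
  unfold Spec_solution
  rw [solution_eq_pureR, solution_alt_eq_pureR]
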